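-- pv_equiv track=rewrite | github.com/bwallace/Deep-PICO | LSTM_extraction.py | _contiguous_pos_indices
-- ===== SOURCE A (Python) =====
-- def _contiguous_pos_indices(y):
--     groups, cur_group = [], []
--     last_y = None
--     for idx, y_i in enumerate(list(y)):
--         y_i = int(y_i)
--         if y_i == last_y == 1:
--             cur_group.append(idx)
--         elif y_i == 1:
--             # then last_y was -1, but this is 1.
--             cur_group = [idx]
--         elif last_y == 1:
--             groups.append(cur_group)
--             cur_group = []
--         last_y = y_i
--
--     if len(cur_group) > 0:
--         groups.append(cur_group)
--     return groups
-- ===== SOURCE B (Python) =====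
-- def _contiguous_pos_indices(y):
--     pos = [i for i, v in enumerate(y) if int(v) == 1]
--     groups = []
--     for i in pos:
--         if groups and groups[-1][-1] == i - 1:
--             groups[-1].append(i)
--         else:
--             groups.append([i])
--     return groups
-- ===== Notes on version B (the rewrite author's own statement) =====
-- stated objective: alternative
-- what changed: Replaces A's single-pass last_y state machine (tracking groups/cur_group/last_y) with a two-phase decomposition: first filter the indices whose value is 1, then group that flat index list by consecutiveness (extend the last group when it ends at i-1).
import Mathlib
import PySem

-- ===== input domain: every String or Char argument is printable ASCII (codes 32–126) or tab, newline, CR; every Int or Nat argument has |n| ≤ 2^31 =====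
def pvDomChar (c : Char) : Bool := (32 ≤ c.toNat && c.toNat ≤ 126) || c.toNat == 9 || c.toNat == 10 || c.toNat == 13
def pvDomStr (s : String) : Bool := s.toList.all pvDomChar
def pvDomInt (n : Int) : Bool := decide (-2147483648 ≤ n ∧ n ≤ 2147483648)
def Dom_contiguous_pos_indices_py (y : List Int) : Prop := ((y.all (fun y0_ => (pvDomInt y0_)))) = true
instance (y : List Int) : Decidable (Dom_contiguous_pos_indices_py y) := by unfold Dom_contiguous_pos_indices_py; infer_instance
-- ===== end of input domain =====

-- B replaces A's one-pass last_y state machine by a filter-the-1-indices pass followed by a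
-- group-by-consecutiveness pass; same cost, different decomposition ("alternative").

-- ===== PORT A =====
-- the for-loop of A, recursing over the list with the running enumerate index idx
-- and the state (groups, cur_group, last_y); int(y_i) is the identity on Int
def cpA : List Int → Int → List (List Int) → List Int → Option Int → List (List Int)
  | [], _, groups, cur, _ => if cur.length > 0 then groups ++ [cur] else groups
  | yi :: ys, idx, groups, cur, last =>
    if yi = 1 ∧ last = some 1 then cpA ys (idx + 1) groups (cur ++ [idx]) (some yi)
    else if yi = 1 then cpA ys (idx + 1) groups [idx] (some yi)
    else if last = some 1 then cpA ys (idx + 1) (groups ++ [cur]) [] (some yi)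
    else cpA ys (idx + 1) groups cur (some yi)

def contiguous_pos_indices_py (y : List Int) : List (List Int) := cpA y 0 [] [] none

-- ===== PORT B =====
-- phase 1 of B: the indices i with int(y[i]) == 1, in order
def cpPos : List Int → Int → List Int
  | [], _ => []
  | v :: ys, i => if v = 1 then i :: cpPos ys (i + 1) else cpPos ys (i + 1)

-- phase 2 of B, one loop step: extend the last group when it ends at i-1, else start [i]
-- (groups[-1] is never empty in B; the `none` inner branch is a totality guard only)
def cpGroup (groups : List (List Int)) (i : Int) : List (List Int) :=
  match groups.getLast? with
  | some g =>
    match g.getLast? with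
    | some l => if l = i - 1 then groups.dropLast ++ [g ++ [i]] else groups ++ [[i]]
    | none => groups ++ [[i]]
  | none => groups ++ [[i]]

def contiguous_pos_indices_py_alt (y : List Int) : List (List Int) :=
  (cpPos y 0).foldl cpGroup []

-- ===== PRECONDITION & SPEC =====
def Spec_contiguous_pos_indices_py (y : List Int) (out : List (List Int)) : Prop := out = contiguous_pos_indices_py_alt y
instance (y : List Int) (out : List (List Int)) : Decidable (Spec_contiguous_pos_indices_py y out) := by unfold Spec_contiguous_pos_indices_py; infer_instance

-- ===== CLAIM (what is proved, stated in full; the proofs are below) =====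
def Claim_equal_contiguous_pos_indices_py : Prop := ∀ (y : List Int), Dom_contiguous_pos_indices_py y → Spec_contiguous_pos_indices_py y (contiguous_pos_indices_py y)

-- ===== LEMMAS AND PROOFS =====

-- last element of the last group
def cpGLast (groups : List (List Int)) : Option Int := groups.getLast?.bind List.getLast?

lemma cpGroup_extend (groups : List (List Int)) (cur : List Int) (idx : Int)
    (h : cur.getLast? = some (idx - 1)) :
    cpGroup (groups ++ [cur]) idx = groups ++ [cur ++ [idx]] := by
  simp [cpGroup, h]

lemma cpGroup_fresh (groups : List (List Int)) (idx : Int)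
    (h : ∀ j, cpGLast groups = some j → j < idx - 1) :
    cpGroup groups idx = groups ++ [[idx]] := by
  unfold cpGroup
  cases hg : groups.getLast? with
  | none => simp
  | some g =>
    cases hl : g.getLast? with
    | none => simp [hl]
    | some l =>
      have : l < idx - 1 := h l (by simp [cpGLast, hg, hl])
      simp [hl, show ¬ l = idx - 1 by omega]

-- main invariant: A's loop from any reachable state computes B's fold over the remaining
-- 1-indices, started from groups with the open cur_group (if any) appended
lemma cpA_eq (ys : List Int) : ∀ (idx : Int) (groups : List (List Int)) (cur : List Int)
    (last : Option Int),
    (last = some 1 → cur.getLast? = some (idx - 1)) →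
    (last ≠ some 1 → cur = [] ∧ ∀ j, cpGLast groups = some j → j < idx - 1) →
    cpA ys idx groups cur last
      = (cpPos ys idx).foldl cpGroup (if cur.isEmpty then groups else groups ++ [cur]) := by
  induction ys with
  | nil =>
    intro idx groups cur last _ _
    cases cur <;> simp [cpA, cpPos]
  | cons yi ys ih =>
    intro idx groups cur last h1 h2
    by_cases hy : yi = 1
    · by_cases hl : last = some 1
      · -- continue the current run
        have hcl := h1 hl
        have hcur : ¬ cur.isEmpty := by
          cases cur <;> simp_all
        rw [show cpA (yi :: ys) idx groups cur last
              = cpA ys (idx + 1) groups (cur ++ [idx]) (some yi) by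
            simp [cpA, hy, hl]]
        rw [ih (idx + 1) groups (cur ++ [idx]) (some yi)
            (fun _ => by simp) (fun h => by simp [hy] at h)]
        simp only [cpPos, if_pos hy, List.foldl_cons]
        rw [show (if (cur ++ [idx]).isEmpty = true then groups else groups ++ [cur ++ [idx]])
              = groups ++ [cur ++ [idx]] by simp,
            show (if cur.isEmpty = true then groups else groups ++ [cur]) = groups ++ [cur]
              from if_neg (by simpa using hcur),
            cpGroup_extend groups cur idx hcl]
      · -- start a fresh run
        obtain ⟨hce, hb⟩ := h2 hl
        subst hce
        rw [show cpA (yi :: ys) idx groups [] last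
              = cpA ys (idx + 1) groups [idx] (some yi) by
            simp [cpA, hy, hl]]
        rw [ih (idx + 1) groups [idx] (some yi)
            (fun _ => by simp) (fun h => by simp [hy] at h)]
        simp only [cpPos, if_pos hy, List.foldl_cons]
        rw [show (if [idx].isEmpty = true then groups else groups ++ [[idx]])
              = groups ++ [[idx]] by simp,
            show (if List.isEmpty ([] : List Int) = true then groups else groups ++ [[]])
              = groups by simp,
            cpGroup_fresh groups idx hb]
    · by_cases hl : last = some 1
      · -- close the current run
        have hcl := h1 hl
        have hcur : ¬ cur.isEmpty := by
          cases cur <;> simp_all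
        rw [show cpA (yi :: ys) idx groups cur last
              = cpA ys (idx + 1) (groups ++ [cur]) [] (some yi) by
            simp [cpA, hy, hl]]
        rw [ih (idx + 1) (groups ++ [cur]) [] (some yi)
            (fun h => by simp [show yi ≠ 1 from hy] at h)
            (fun _ => ⟨rfl, by
              intro j hj
              simp [cpGLast, hcl] at hj
              omega⟩)]
        simp [cpPos, hy, hcur]
      · -- nothing happens
        obtain ⟨hce, hb⟩ := h2 hl
        subst hce
        rw [show cpA (yi :: ys) idx groups [] last
              = cpA ys (idx + 1) groups [] (some yi) by
            simp [cpA, hy, hl]]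
        rw [ih (idx + 1) groups [] (some yi)
            (fun h => by simp [show yi ≠ 1 from hy] at h)
            (fun _ => ⟨rfl, fun j hj => by have := hb j hj; omega⟩)]
        simp [cpPos, hy]

-- ===== VERDICT (by name: the statement is the Claim_ definition above) =====
theorem contiguous_pos_indices_py_spec : Claim_equal_contiguous_pos_indices_py := by
  intro y _
  unfold Spec_contiguous_pos_indices_py contiguous_pos_indices_py contiguous_pos_indices_py_alt
  rw [cpA_eq y 0 [] [] none (by simp) (fun _ => ⟨rfl, by simp [cpGLast]⟩)]
  simp
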